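-- pv_equiv track=rewrite | github.com/BayyinahEnterprise/Bayyinah-Integrity-Scanner | analyzers/text_analyzer.py | _strip_literal_strings
-- ===== SOURCE A (Python) =====
-- def _strip_literal_strings(s: str) -> str:
--     """Replace every ``(...)`` literal and every ``<...>`` hex string
--     with spaces, preserving offsets. Escaped parens inside literals
--     are handled correctly.
--     """
--     out = list(s)
--     n = len(s)
--     i = 0
--     while i < n:
--         c = s[i]
--         if c == "(":
--             depth = 1
--             j = i + 1
--             while j < n and depth > 0:
--                 if s[j] == "\\" and j + 1 < n:
--                     j += 2
--                     continue
--                 if s[j] == "(":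
--                     depth += 1
--                 elif s[j] == ")":
--                     depth -= 1
--                 j += 1
--             for k in range(i, min(j, n)):
--                 out[k] = " "
--             i = j
--         elif c == "<":
--             j = i + 1
--             while j < n and s[j] != ">":
--                 j += 1
--             for k in range(i, min(j + 1, n)):
--                 out[k] = " "
--             i = j + 1
--         else:
--             i += 1
--     return "".join(out)
-- ===== SOURCE B (Python) =====
-- def _strip_literal_strings(s: str) -> str:
--     """Single-pass finite-state-machine scanner: one while-loop over the
--     characters with a state variable and depth counter, blanking as it goes."""
--     out = []
--     n = len(s)
--     i = 0
--     state = "normal"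
--     depth = 0
--     while i < n:
--         c = s[i]
--         if state == "normal":
--             if c == "(":
--                 out.append(" ")
--                 state = "paren"
--                 depth = 1
--                 i += 1
--             elif c == "<":
--                 out.append(" ")
--                 state = "hex"
--                 i += 1
--             else:
--                 out.append(c)
--                 i += 1
--         elif state == "paren":
--             if c == "\\" and i + 1 < n:
--                 out.append(" ")
--                 out.append(" ")
--                 i += 2
--             else:
--                 if c == "(":
--                     depth += 1
--                 elif c == ")":
--                     depth -= 1
--                     if depth == 0:
--                         state = "normal"
--                 out.append(" ")
--                 i += 1
--         else:  # hex
--             out.append(" ")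
--             if c == ">":
--                 state = "normal"
--             i += 1
--     return "".join(out)
-- ===== Notes on version B (the rewrite author's own statement) =====
-- stated objective: idiomatic
-- what changed: A's nested scanner (inner while-loops to find the matching delimiter, then a blanking for-loop and an index jump) is replaced by a single per-character finite-state-machine pass with a state variable and depth counter that emits each output character as it consumes the input.
import Mathlib
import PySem

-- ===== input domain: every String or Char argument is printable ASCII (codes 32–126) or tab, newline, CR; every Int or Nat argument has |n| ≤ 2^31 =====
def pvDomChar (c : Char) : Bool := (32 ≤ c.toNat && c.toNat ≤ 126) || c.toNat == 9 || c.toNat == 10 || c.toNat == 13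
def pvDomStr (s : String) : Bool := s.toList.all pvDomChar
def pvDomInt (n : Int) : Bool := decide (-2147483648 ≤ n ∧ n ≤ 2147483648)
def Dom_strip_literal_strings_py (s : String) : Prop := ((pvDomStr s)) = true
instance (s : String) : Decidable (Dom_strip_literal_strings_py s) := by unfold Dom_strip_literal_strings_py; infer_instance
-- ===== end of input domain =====

-- B replaces A's nested scans (inner while-loops + blanking for-loops + index jumps) by a
-- single per-character finite-state-machine pass; objective: idiomatic/alternative, same cost.
-- (The `fuel` parameters below are only totality guards for the while-loops: every call
-- supplies enough fuel, since each loop advances its index by at least 1 per step.)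

-- ===== PORT A =====
-- inner `while j < n and depth > 0` loop of the "(" branch
def pvAParen (s : List Char) (n : Nat) : Nat → Nat → Nat → Nat
  | 0, j, _ => j
  | fuel + 1, j, depth =>
    if j < n ∧ 0 < depth then
      if s.getD j ' ' == '\\' && decide (j + 1 < n) then pvAParen s n fuel (j + 2) depth
      else if s.getD j ' ' == '(' then pvAParen s n fuel (j + 1) (depth + 1)
      else if s.getD j ' ' == ')' then pvAParen s n fuel (j + 1) (depth - 1)
      else pvAParen s n fuel (j + 1) depth
    else j

-- inner `while j < n and s[j] != '>'` loop of the "<" branch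
def pvAHex (s : List Char) (n : Nat) : Nat → Nat → Nat
  | 0, j => j
  | fuel + 1, j =>
    if j < n ∧ ¬ s.getD j ' ' == '>' then pvAHex s n fuel (j + 1) else j

-- `for k in range(a, b): out[k] = " "`
def pvBlank (out : List Char) (a b : Nat) : List Char :=
  (List.range' a (b - a)).foldl (fun o k => o.set k ' ') out

-- outer `while i < n` loop
def pvALoop (s : List Char) (n : Nat) : Nat → List Char → Nat → List Char
  | 0, out, _ => out
  | fuel + 1, out, i =>
    if i < n then
      let c := s.getD i ' '
      if c == '(' then
        let j := pvAParen s n fuel (i + 1) 1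
        pvALoop s n fuel (pvBlank out i (min j n)) j
      else if c == '<' then
        let j := pvAHex s n fuel (i + 1)
        pvALoop s n fuel (pvBlank out i (min (j + 1) n)) (j + 1)
      else
        pvALoop s n fuel out (i + 1)
    else out

def strip_literal_strings_py (s : String) : String :=
  String.ofList (pvALoop s.toList s.toList.length (s.toList.length + 1) s.toList 0)

-- ===== PORT B =====
inductive PvSt | normal | paren | hex
deriving DecidableEq, Repr

-- B's single `while i < n` loop: per-character state dispatch
def pvBLoop (s : List Char) (n : Nat) : Nat → Nat → PvSt → Nat → List Char → List Char
  | 0, _, _, _, out => out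
  | fuel + 1, i, st, depth, out =>
    if i < n then
      let c := s.getD i ' '
      match st with
      | .normal =>
        if c == '(' then pvBLoop s n fuel (i + 1) .paren 1 (out ++ [' '])
        else if c == '<' then pvBLoop s n fuel (i + 1) .hex depth (out ++ [' '])
        else pvBLoop s n fuel (i + 1) .normal depth (out ++ [c])
      | .paren =>
        if c == '\\' && decide (i + 1 < n) then pvBLoop s n fuel (i + 2) .paren depth (out ++ [' ', ' '])
        else if c == '(' then pvBLoop s n fuel (i + 1) .paren (depth + 1) (out ++ [' '])
        else if c == ')' then
          if depth - 1 == 0 then pvBLoop s n fuel (i + 1) .normal 0 (out ++ [' '])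
          else pvBLoop s n fuel (i + 1) .paren (depth - 1) (out ++ [' '])
        else pvBLoop s n fuel (i + 1) .paren depth (out ++ [' '])
      | .hex =>
        if c == '>' then pvBLoop s n fuel (i + 1) .normal depth (out ++ [' '])
        else pvBLoop s n fuel (i + 1) .hex depth (out ++ [' '])
    else out

def strip_literal_strings_py_alt (s : String) : String :=
  String.ofList (pvBLoop s.toList s.toList.length (s.toList.length + 1) 0 .normal 0 [])

-- ===== PRECONDITION & SPEC =====
def Spec_strip_literal_strings_py (s : String) (out : String) : Prop := out = strip_literal_strings_py_alt s
instance (s : String) (out : String) : Decidable (Spec_strip_literal_strings_py s out) := by unfold Spec_strip_literal_strings_py; infer_instance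

-- ===== CLAIM (what is proved, stated in full; the proofs are below) =====
def Claim_equal_strip_literal_strings_py : Prop := ∀ (s : String), Dom_strip_literal_strings_py s → Spec_strip_literal_strings_py s (strip_literal_strings_py s)

-- ===== LEMMAS AND PROOFS =====

theorem pvAParen_ge (s : List Char) (n : Nat) :
    ∀ f j depth, j ≤ pvAParen s n f j depth := by
  intro f
  induction f with
  | zero => intro j depth; simp [pvAParen]
  | succ f ih =>
    intro j depth
    rw [pvAParen]
    split_ifs with h1 h2 h3 h4
    · exact le_trans (by omega) (ih (j + 2) depth)
    · exact le_trans (by omega) (ih (j + 1) (depth + 1))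
    · exact le_trans (by omega) (ih (j + 1) (depth - 1))
    · exact le_trans (by omega) (ih (j + 1) depth)
    · exact le_rfl

theorem pvAHex_ge (s : List Char) (n : Nat) :
    ∀ f j, j ≤ pvAHex s n f j := by
  intro f
  induction f with
  | zero => intro j; simp [pvAHex]
  | succ f ih =>
    intro j
    rw [pvAHex]
    split_ifs with h1
    · exact le_trans (by omega) (ih (j + 1))
    · exact le_rfl

theorem pvBLoop_exit (s : List Char) (n : Nat) (f i : Nat) (st : PvSt) (depth : Nat)
    (out : List Char) (hi : ¬ i < n) : pvBLoop s n f i st depth out = out := by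
  cases f with
  | zero => rw [pvBLoop]
  | succ f => rw [pvBLoop]; simp [hi]

-- fuel irrelevance for B's loop: any fuel ≥ n - i computes the same value
theorem pvBLoop_fuel (s : List Char) (n : Nat) :
    ∀ f1 f2 i st depth out, n ≤ i + f1 → n ≤ i + f2 →
      pvBLoop s n f1 i st depth out = pvBLoop s n f2 i st depth out := by
  intro f1
  induction f1 with
  | zero =>
    intro f2 i st depth out h1 h2
    have hi : ¬ i < n := by omega
    rw [pvBLoop_exit s n 0 i st depth out hi, pvBLoop_exit s n f2 i st depth out hi]
  | succ f1 ih =>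
    intro f2 i st depth out h1 h2
    by_cases hi : i < n
    · obtain ⟨f2', rfl⟩ : ∃ f2', f2 = f2' + 1 := ⟨f2 - 1, by omega⟩
      rw [pvBLoop, pvBLoop]
      simp only [if_pos hi]
      cases st with
      | normal =>
        dsimp only
        split_ifs with h
        · exact ih f2' (i + 1) _ _ _ (by omega) (by omega)
        · exact ih f2' (i + 1) _ _ _ (by omega) (by omega)
        · exact ih f2' (i + 1) _ _ _ (by omega) (by omega)
      | paren =>
        dsimp only
        split_ifs with h h' h'' h'''
        · exact ih f2' (i + 2) _ _ _ (by omega) (by omega)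
        · exact ih f2' (i + 1) _ _ _ (by omega) (by omega)
        · exact ih f2' (i + 1) _ _ _ (by omega) (by omega)
        · exact ih f2' (i + 1) _ _ _ (by omega) (by omega)
        · exact ih f2' (i + 1) _ _ _ (by omega) (by omega)
      | hex =>
        dsimp only
        split_ifs with h
        · exact ih f2' (i + 1) _ _ _ (by omega) (by omega)
        · exact ih f2' (i + 1) _ _ _ (by omega) (by omega)
    · rw [pvBLoop_exit s n _ i st depth out hi, pvBLoop_exit s n f2 i st depth out hi]

theorem pvBlank_split (acc rest : List Char) (m : Nat) (hm : m ≤ rest.length) :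
    (List.range' acc.length m).foldl (fun o k => o.set k ' ') (acc ++ rest)
      = acc ++ List.replicate m ' ' ++ rest.drop m := by
  induction m generalizing acc rest with
  | zero => simp
  | succ m ih =>
    rw [List.range'_succ, List.foldl_cons]
    cases rest with
    | nil => simp at hm
    | cons r rs =>
      have hset : (acc ++ r :: rs).set acc.length ' ' = (acc ++ [' ']) ++ rs := by
        rw [List.set_append_right _ _ (le_refl _)]
        simp
      rw [hset]
      have := ih (acc ++ [' ']) rs (by simpa using hm)
      simp only [List.length_append, List.length_cons, List.length_nil] at this ⊢
      rw [show acc.length + 1 = (acc ++ [' ']).length by simp] at *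
      rw [this]
      simp [List.replicate_succ, List.append_assoc]

-- B in the 'paren' state from p tracks A's inner paren scan: it blanks exactly the
-- characters the scan consumes and resumes 'normal' where A's scan stops
theorem pvParen_eq (s : List Char) (n : Nat) :
    ∀ f p depth acc, 0 < depth → n ≤ p + f →
      pvBLoop s n f p .paren depth acc
        = pvBLoop s n f (pvAParen s n f p depth) .normal 0
            (acc ++ List.replicate (min (pvAParen s n f p depth) n - p) ' ') := by
  intro f
  induction f with
  | zero =>
    intro p depth acc hd hf
    have hp : ¬ p < n := by omega
    rw [pvAParen]
    rw [pvBLoop_exit s n 0 p _ _ _ hp, pvBLoop_exit s n 0 p _ _ _ hp]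
    simp [show min p n - p = 0 by omega]
  | succ f ih =>
    intro p depth acc hd hf
    by_cases hp : p < n
    · rw [pvBLoop, pvAParen]
      simp only [if_pos hp, if_pos (⟨hp, hd⟩ : p < n ∧ 0 < depth)]
      by_cases hbs : (s.getD p ' ' == '\\' && decide (p + 1 < n)) = true
      · simp only [hbs, if_pos]
        rw [ih (p + 2) depth (acc ++ [' ', ' ']) hd (by simp only [Bool.and_eq_true, decide_eq_true_eq] at hbs; omega)]
        have hge := pvAParen_ge s n f (p + 2) depth
        have hn2 : p + 2 ≤ n := by simp only [Bool.and_eq_true, decide_eq_true_eq] at hbs; omega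
        have hmin : p + 2 ≤ min (pvAParen s n f (p + 2) depth) n := le_min (by omega) hn2
        rw [pvBLoop_fuel s n f (f + 1) _ _ _ _ (by omega) (by omega),
          show min (pvAParen s n f (p + 2) depth) n - p
            = (min (pvAParen s n f (p + 2) depth) n - (p + 2)) + 2 by omega]
        simp [List.replicate_succ, List.append_assoc]
      · simp only [hbs, Bool.false_eq_true, if_false]
        by_cases hop : (s.getD p ' ' == '(') = true
        · simp only [hop, if_pos]
          rw [ih (p + 1) (depth + 1) (acc ++ [' ']) (by omega) (by omega)]
          have hge := pvAParen_ge s n f (p + 1) (depth + 1)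
          have hmin : p + 1 ≤ min (pvAParen s n f (p + 1) (depth + 1)) n := le_min (by omega) hp
          rw [pvBLoop_fuel s n f (f + 1) _ _ _ _ (by omega) (by omega),
            show min (pvAParen s n f (p + 1) (depth + 1)) n - p
              = (min (pvAParen s n f (p + 1) (depth + 1)) n - (p + 1)) + 1 by omega]
          simp [List.replicate_succ, List.append_assoc]
        · simp only [hop, Bool.false_eq_true, if_false]
          by_cases hcl : (s.getD p ' ' == ')') = true
          · simp only [hcl, if_pos]
            by_cases hd1 : depth - 1 = 0
            · have hstop : pvAParen s n f (p + 1) (depth - 1) = p + 1 := by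
                cases f with
                | zero => rw [pvAParen]
                | succ f => rw [pvAParen]; simp [hd1]
              rw [hstop]
              simp only [hd1, beq_self_eq_true, if_pos]
              rw [pvBLoop_fuel s n f (f + 1) _ _ _ _ (by omega) (by omega),
                show min (p + 1) n - p = 1 by omega]
              simp
            · have hne : (depth - 1 == 0) = false := by simp [hd1]
              rw [hne]
              simp only [Bool.false_eq_true, if_false]
              rw [ih (p + 1) (depth - 1) (acc ++ [' ']) (by omega) (by omega)]
              have hge := pvAParen_ge s n f (p + 1) (depth - 1)
              have hmin : p + 1 ≤ min (pvAParen s n f (p + 1) (depth - 1)) n := le_min (by omega) hp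
              rw [pvBLoop_fuel s n f (f + 1) _ _ _ _ (by omega) (by omega),
                show min (pvAParen s n f (p + 1) (depth - 1)) n - p
                  = (min (pvAParen s n f (p + 1) (depth - 1)) n - (p + 1)) + 1 by omega]
              simp [List.replicate_succ, List.append_assoc]
          · simp only [hcl, Bool.false_eq_true, if_false]
            rw [ih (p + 1) depth (acc ++ [' ']) hd (by omega)]
            have hge := pvAParen_ge s n f (p + 1) depth
            have hmin : p + 1 ≤ min (pvAParen s n f (p + 1) depth) n := le_min (by omega) hp
            rw [pvBLoop_fuel s n f (f + 1) _ _ _ _ (by omega) (by omega),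
              show min (pvAParen s n f (p + 1) depth) n - p
                = (min (pvAParen s n f (p + 1) depth) n - (p + 1)) + 1 by omega]
            simp [List.replicate_succ, List.append_assoc]
    · rw [pvAParen]
      simp only [show ¬ (p < n ∧ 0 < depth) from fun h => hp h.1, if_false]
      rw [pvBLoop_exit s n _ p _ _ _ hp, pvBLoop_exit s n _ p _ _ _ hp]
      simp [show min p n - p = 0 by omega]

-- B in the 'hex' state from p tracks A's inner hex scan and resumes 'normal' after the '>'
theorem pvHex_eq (s : List Char) (n : Nat) :
    ∀ f p depth acc, n ≤ p + f →
      pvBLoop s n f p .hex depth acc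
        = pvBLoop s n f (pvAHex s n f p + 1) .normal depth
            (acc ++ List.replicate (min (pvAHex s n f p + 1) n - p) ' ') := by
  intro f
  induction f with
  | zero =>
    intro p depth acc hf
    have hp : ¬ p < n := by omega
    rw [pvAHex]
    rw [pvBLoop_exit s n 0 p _ _ _ hp, pvBLoop_exit s n 0 _ _ _ _ (by omega)]
    simp [show min (p + 1) n - p = 0 by omega]
  | succ f ih =>
    intro p depth acc hf
    by_cases hp : p < n
    · rw [pvBLoop, pvAHex]
      simp only [if_pos hp]
      by_cases hgt : (s.getD p ' ' == '>') = true
      · rw [if_pos hgt, if_neg (show ¬ (p < n ∧ ¬ (s.getD p ' ' == '>') = true) from fun h => h.2 hgt)]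
        rw [pvBLoop_fuel s n f (f + 1) _ _ _ _ (by omega) (by omega),
          show min (p + 1) n - p = 1 by omega]
        simp
      · rw [if_neg hgt, if_pos (⟨hp, hgt⟩ : p < n ∧ ¬ (s.getD p ' ' == '>') = true)]
        rw [ih (p + 1) depth (acc ++ [' ']) (by omega)]
        have hge := pvAHex_ge s n f (p + 1)
        have hmin : p + 1 ≤ min (pvAHex s n f (p + 1) + 1) n := le_min (by omega) hp
        rw [pvBLoop_fuel s n f (f + 1) _ _ _ _ (by omega) (by omega),
          show min (pvAHex s n f (p + 1) + 1) n - p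
            = (min (pvAHex s n f (p + 1) + 1) n - (p + 1)) + 1 by omega]
        simp [List.replicate_succ, List.append_assoc]
    · rw [pvAHex]
      simp only [show ¬ (p < n ∧ ¬ (s.getD p ' ' == '>') = true) from fun h => hp h.1, if_false]
      rw [pvBLoop_exit s n _ p _ _ _ hp, pvBLoop_exit s n _ _ _ _ _ (by omega)]
      simp [show min (p + 1) n - p = 0 by omega]

-- main invariant: at every 'normal' point i, A's not-yet-processed suffix of `out` is still
-- the suffix of s, and equals B's continuation from the same position
theorem pvMain (s : List Char) (n : Nat) (hn : n = s.length) :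
    ∀ f i acc depth, n ≤ i + f → acc.length = min i n →
      pvALoop s n f (acc ++ s.drop i) i = pvBLoop s n f i .normal depth acc := by
  intro f
  induction f with
  | zero =>
    intro i acc depth hf hl
    rw [pvALoop, pvBLoop]
    simp [List.drop_eq_nil_of_le (by omega : s.length ≤ i)]
  | succ f ih =>
    intro i acc depth hf hl
    by_cases hi : i < n
    · have hacc : acc.length = i := by omega
      have hdropl : (s.drop i).length = n - i := by simp [hn]
      rw [pvALoop, pvBLoop]
      simp only [if_pos hi]
      by_cases hc : (s.getD i ' ' == '(') = true
      · simp only [hc, if_pos]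
        set j := pvAParen s n f (i + 1) 1 with hjdef
        have hjge : i + 1 ≤ j := pvAParen_ge s n f (i + 1) 1
        have hmin : i + 1 ≤ min j n := le_min hjge hi
        have hsp := pvBlank_split acc (s.drop i) (min j n - i) (by omega)
        rw [hacc] at hsp
        have hblank : pvBlank (acc ++ s.drop i) i (min j n)
            = (acc ++ List.replicate (min j n - i) ' ') ++ s.drop j := by
          rw [pvBlank, hsp, List.drop_drop]
          rw [show i + (min j n - i) = min j n by omega]
          rcases Nat.lt_or_ge n j with hlt | hge
          · rw [Nat.min_eq_right (by omega)]
            simp [List.drop_eq_nil_of_le (by omega : s.length ≤ n),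
              List.drop_eq_nil_of_le (by omega : s.length ≤ j)]
          · simp [Nat.min_eq_left hge, List.append_assoc]
        rw [hblank, ih j (acc ++ List.replicate (min j n - i) ' ') 0 (by omega) (by simp; omega)]
        rw [pvParen_eq s n f (i + 1) 1 (acc ++ [' ']) (by omega) (by omega)]
        rw [← hjdef]
        rw [show min j n - i = (min j n - (i + 1)) + 1 by omega]
        simp [List.replicate_succ, List.append_assoc]
      · simp only [hc, Bool.false_eq_true, if_false]
        by_cases hc2 : (s.getD i ' ' == '<') = true
        · simp only [hc2, if_pos]
          set j := pvAHex s n f (i + 1) with hjdef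
          have hjge : i + 1 ≤ j := pvAHex_ge s n f (i + 1)
          have hmin : i + 1 ≤ min (j + 1) n := le_min (by omega) hi
          have hsp := pvBlank_split acc (s.drop i) (min (j + 1) n - i) (by omega)
          rw [hacc] at hsp
          have hblank : pvBlank (acc ++ s.drop i) i (min (j + 1) n)
              = (acc ++ List.replicate (min (j + 1) n - i) ' ') ++ s.drop (j + 1) := by
            rw [pvBlank, hsp, List.drop_drop]
            rw [show i + (min (j + 1) n - i) = min (j + 1) n by omega]
            rcases Nat.lt_or_ge n (j + 1) with hlt | hge
            · rw [Nat.min_eq_right (by omega)]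
              simp [List.drop_eq_nil_of_le (by omega : s.length ≤ n),
                List.drop_eq_nil_of_le (by omega : s.length ≤ j + 1)]
            · simp [Nat.min_eq_left hge, List.append_assoc]
          rw [hblank,
            ih (j + 1) (acc ++ List.replicate (min (j + 1) n - i) ' ') depth (by omega) (by simp; omega)]
          rw [pvHex_eq s n f (i + 1) depth (acc ++ [' ']) (by omega)]
          rw [← hjdef]
          rw [show min (j + 1) n - i = (min (j + 1) n - (i + 1)) + 1 by omega]
          simp [List.replicate_succ, List.append_assoc]
        · simp only [hc2, Bool.false_eq_true, if_false]
          have hdrop : s.drop i = s.getD i ' ' :: s.drop (i + 1) := by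
            rw [List.drop_eq_getElem_cons (by omega : i < s.length)]
            simp [List.getD, List.getElem?_eq_getElem (by omega : i < s.length)]
          rw [hdrop, show acc ++ (s.getD i ' ' :: s.drop (i + 1))
              = (acc ++ [s.getD i ' ']) ++ s.drop (i + 1) by simp]
          exact ih (i + 1) (acc ++ [s.getD i ' ']) depth (by omega) (by simp; omega)
    · rw [pvALoop, pvBLoop]
      simp [hi, List.drop_eq_nil_of_le (by omega : s.length ≤ i)]

-- ===== VERDICT (by name: the statement is the Claim_ definition above) =====
theorem strip_literal_strings_py_spec : Claim_equal_strip_literal_strings_py := by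
  intro s _
  unfold Spec_strip_literal_strings_py strip_literal_strings_py strip_literal_strings_py_alt
  have := pvMain s.toList s.toList.length rfl (s.toList.length + 1) 0 [] 0 (by omega) (by simp)
  simpa using congrArg String.ofList this
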